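-- pv_equiv track=rewrite | github.com/congagen/anyiosyn | lib/compose_tools.py | compose_koch
-- ===== SOURCE A (Python) =====
-- def compose_koch(gen_conf, note_index, bar_num, c_distance):
--     sequence = []
--
--     seq_sixth = int(gen_conf['note_count_bar'] / 6)
--     k_range_a = range(int(seq_sixth * 2), int(seq_sixth * 3))
--     k_range_b = range(int(seq_sixth * 3), int(seq_sixth * 4))
--
--     step_pos = 0
--
--     for i in range(gen_conf['note_count_bar']):
--         raw_val = 1
--
--         if i in k_range_a:
--             step_pos += gen_conf['step_size']
--             new_note = raw_val + int(step_pos)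
--             sequence.append(gen_conf['note_floor'] + new_note)
--
--         elif i in k_range_b:
--             step_pos -= gen_conf['step_size']
--             new_note = raw_val + int(step_pos)
--             sequence.append(abs(gen_conf['note_floor'] + new_note))
--
--         else:
--             sequence.append(abs(gen_conf['note_floor'] + raw_val))
--
--     return sequence
-- ===== SOURCE B (Python) =====
-- def compose_koch(gen_conf, note_index, bar_num, c_distance):
--     # Segment-wise construction: flat | rising | falling | flat, computed
--     # directly from the four region boundaries instead of testing every index.
--     n = gen_conf['note_count_bar']
--     if n <= 0:
--         return []
--     base = gen_conf['note_floor'] + 1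
--     s = n // 6
--     out = [abs(base)] * (2 * s)
--     if s > 0:
--         # step_size is only consulted when a sloped segment exists
--         step = gen_conf['step_size']
--         out += [base + step * j for j in range(1, s + 1)]
--         out += [abs(base + step * (s - j)) for j in range(1, s + 1)]
--     out += [abs(base)] * (n - 4 * s)
--     return out
-- ===== Notes on version B (the rewrite author's own statement) =====
-- stated objective: alternative
-- what changed: B replaces A's per-index loop that tests each i against two ranges while threading a step accumulator by a direct four-segment construction (flat | rising | falling | flat) computed from the region boundaries, with the sloped values given in closed form step*j.
import Mathlib
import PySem

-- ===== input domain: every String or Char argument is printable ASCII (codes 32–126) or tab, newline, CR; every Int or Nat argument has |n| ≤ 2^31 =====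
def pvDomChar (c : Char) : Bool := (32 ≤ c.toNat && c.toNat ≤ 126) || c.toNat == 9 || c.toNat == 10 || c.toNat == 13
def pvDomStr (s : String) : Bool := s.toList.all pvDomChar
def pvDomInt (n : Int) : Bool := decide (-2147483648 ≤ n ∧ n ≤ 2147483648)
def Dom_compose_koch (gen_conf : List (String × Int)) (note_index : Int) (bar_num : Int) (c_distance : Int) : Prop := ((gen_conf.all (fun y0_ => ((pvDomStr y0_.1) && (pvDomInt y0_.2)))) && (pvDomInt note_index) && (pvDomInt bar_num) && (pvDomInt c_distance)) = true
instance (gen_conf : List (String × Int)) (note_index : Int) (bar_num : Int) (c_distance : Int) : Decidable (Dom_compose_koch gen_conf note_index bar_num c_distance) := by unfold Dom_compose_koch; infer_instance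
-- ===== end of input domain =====

-- B rebuilds the sequence as four boundary-computed segments (flat|rising|falling|flat) with
-- closed-form sloped values, instead of A's per-index range tests with a running accumulator.

-- ===== PORT A =====
-- the loop body of A, one step of the fold (state = (sequence, step_pos))
def kochStep (d : PySem.Dict String Int) (seq_sixth : Int) (st : List Int × Int) (i : Int) :
    List Int × Int :=
  let sequence := st.1
  let step_pos := st.2
  let raw_val : Int := 1
  if seq_sixth * 2 ≤ i ∧ i < seq_sixth * 3 then
    let step_pos := step_pos + d.getD "step_size" 0
    let new_note := raw_val + step_pos
    (sequence ++ [d.getD "note_floor" 0 + new_note], step_pos)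
  else if seq_sixth * 3 ≤ i ∧ i < seq_sixth * 4 then
    let step_pos := step_pos - d.getD "step_size" 0
    let new_note := raw_val + step_pos
    (sequence ++ [|d.getD "note_floor" 0 + new_note|], step_pos)
  else
    (sequence ++ [|d.getD "note_floor" 0 + raw_val|], step_pos)

-- Python dict access raises KeyError on missing keys: Pre_ excludes exactly those inputs,
-- so the `getD … 0` defaults are never consulted inside Pre_.
-- `int(n/6)` (float division then truncation) is exactly Int.tdiv n 6 for |n| ≤ 2^31 (Dom).
def compose_koch (gen_conf : List (String × Int)) (note_index : Int) (bar_num : Int) (c_distance : Int) : List Int :=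
  let d := PySem.Dict.ofList gen_conf
  let n := d.getD "note_count_bar" 0
  let seq_sixth := Int.tdiv n 6
  ((PySem.List.pyRange 0 n 1).foldl (kochStep d seq_sixth) ([], 0)).1

-- ===== PORT B =====
def compose_koch_alt (gen_conf : List (String × Int)) (note_index : Int) (bar_num : Int) (c_distance : Int) : List Int :=
  let d := PySem.Dict.ofList gen_conf
  let n := d.getD "note_count_bar" 0
  if n ≤ 0 then []
  else
    let base := d.getD "note_floor" 0 + 1
    let s := PySem.Int.floordiv n 6
    let out := List.replicate (2 * s).toNat |base|
    let out := if 0 < s then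
        let step := d.getD "step_size" 0
        out ++ (PySem.List.pyRange 1 (s + 1) 1).map (fun j => base + step * j)
            ++ (PySem.List.pyRange 1 (s + 1) 1).map (fun j => |base + step * (s - j)|)
      else out
    out ++ List.replicate (n - 4 * s).toNat |base|

-- ===== PRECONDITION & SPEC =====
-- Pre_ excludes exactly the inputs where A raises KeyError: 'note_count_bar' missing, or
-- 'note_floor' missing while the loop runs (n > 0), or 'step_size' missing while the rising
-- region is reached (n ≥ 6).
def Pre_compose_koch (gen_conf : List (String × Int)) (note_index : Int) (bar_num : Int) (c_distance : Int) : Prop :=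
  ((PySem.Dict.ofList gen_conf).get? "note_count_bar").isSome = true ∧
  (0 < ((PySem.Dict.ofList gen_conf).get? "note_count_bar").getD 0 →
    ((PySem.Dict.ofList gen_conf).get? "note_floor").isSome = true) ∧
  (6 ≤ ((PySem.Dict.ofList gen_conf).get? "note_count_bar").getD 0 →
    ((PySem.Dict.ofList gen_conf).get? "step_size").isSome = true)
instance (gen_conf : List (String × Int)) (note_index : Int) (bar_num : Int) (c_distance : Int) : Decidable (Pre_compose_koch gen_conf note_index bar_num c_distance) := by unfold Pre_compose_koch; infer_instance

def pvWitness_compose_koch : (List (String × Int)) × Int × Int × Int :=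
  ([("note_count_bar", 13), ("note_floor", 3), ("step_size", 2)], 0, 0, 0)

def Spec_compose_koch (gen_conf : List (String × Int)) (note_index : Int) (bar_num : Int) (c_distance : Int) (out : List Int) : Prop := out = compose_koch_alt gen_conf note_index bar_num c_distance
instance (gen_conf : List (String × Int)) (note_index : Int) (bar_num : Int) (c_distance : Int) (out : List Int) : Decidable (Spec_compose_koch gen_conf note_index bar_num c_distance out) := by unfold Spec_compose_koch; infer_instance

-- ===== CLAIM (what is proved, stated in full; the proofs are below) =====
def Claim_equal_compose_koch : Prop := ∀ (gen_conf : List (String × Int)) (note_index : Int) (bar_num : Int) (c_distance : Int), Dom_compose_koch gen_conf note_index bar_num c_distance → Pre_compose_koch gen_conf note_index bar_num c_distance → Spec_compose_koch gen_conf note_index bar_num c_distance (compose_koch gen_conf note_index bar_num c_distance)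

-- ===== LEMMAS AND PROOFS =====

-- flat regions: every index outside both sloped ranges appends |nf+1| and leaves step_pos alone
theorem kochStep_flat (d : PySem.Dict String Int) (s : Int)
    (L : List Int) (hL : ∀ i ∈ L, i < 2 * s ∨ 4 * s ≤ i) (seq : List Int) (p : Int) :
    L.foldl (kochStep d s) (seq, p) =
      (seq ++ L.map (fun _ => |d.getD "note_floor" 0 + 1|), p) := by
  induction L generalizing seq with
  | nil => simp
  | cons a L ih =>
    have ha := hL a (by simp)
    have h1 : ¬ (s * 2 ≤ a ∧ a < s * 3) := by omega
    have h2 : ¬ (s * 3 ≤ a ∧ a < s * 4) := by omega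
    simp only [List.foldl_cons, kochStep, h1, h2, if_false, List.map_cons]
    rw [ih (fun i hi => hL i (by simp [hi]))]
    simp

-- rising region: each step adds `step` to step_pos and appends nf + 1 + step_pos
theorem kochStep_rise (d : PySem.Dict String Int) (s : Int)
    (L : List Int) (hL : ∀ i ∈ L, s * 2 ≤ i ∧ i < s * 3) (seq : List Int) (p : Int) :
    L.foldl (kochStep d s) (seq, p) =
      (seq ++ (List.range L.length).map
          (fun k : Nat => d.getD "note_floor" 0 + (1 + (p + d.getD "step_size" 0 * ((k : Int) + 1)))),
        p + d.getD "step_size" 0 * L.length) := by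
  induction L generalizing seq p with
  | nil => simp
  | cons a L ih =>
    have ha := hL a (by simp)
    simp only [List.foldl_cons, kochStep, ha, and_self, if_true]
    rw [ih (fun i hi => hL i (by simp [hi]))]
    simp only [List.length_cons, List.range_succ_eq_map, List.map_cons, List.map_map,
      Prod.mk.injEq]
    constructor
    · simp only [List.append_assoc, List.singleton_append]
      congr 2
      · push_cast; ring
      · apply List.map_congr_left
        intro k _
        simp only [Function.comp_apply]
        push_cast; ring
    · push_cast; ring

-- falling region: each step subtracts `step` and appends |nf + 1 + step_pos|
theorem kochStep_fall (d : PySem.Dict String Int) (s : Int)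
    (L : List Int) (hL : ∀ i ∈ L, s * 3 ≤ i ∧ i < s * 4) (seq : List Int) (p : Int) :
    L.foldl (kochStep d s) (seq, p) =
      (seq ++ (List.range L.length).map
          (fun k : Nat => |d.getD "note_floor" 0 + (1 + (p - d.getD "step_size" 0 * ((k : Int) + 1)))|),
        p - d.getD "step_size" 0 * L.length) := by
  induction L generalizing seq p with
  | nil => simp
  | cons a L ih =>
    have ha := hL a (by simp)
    have h1 : ¬ (s * 2 ≤ a ∧ a < s * 3) := by omega
    simp only [List.foldl_cons, kochStep, h1, if_false, ha, and_self, if_true]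
    rw [ih (fun i hi => hL i (by simp [hi]))]
    simp only [List.length_cons, List.range_succ_eq_map, List.map_cons, List.map_map,
      Prod.mk.injEq]
    constructor
    · simp only [List.append_assoc, List.singleton_append]
      congr 2
      · push_cast; ring_nf
      · apply List.map_congr_left
        intro k _
        simp only [Function.comp_apply]
        congr 1
        push_cast; ring
    · push_cast; ring

-- ===== VERDICT (by name: the statement is the Claim_ definition above) =====
theorem compose_koch_spec : Claim_equal_compose_koch := by
  intro gen_conf note_index bar_num c_distance _hdom _hpre
  unfold Spec_compose_koch compose_koch compose_koch_alt
  dsimp only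
  set d := PySem.Dict.ofList gen_conf with hd
  set n := d.getD "note_count_bar" 0 with hn
  set nf := d.getD "note_floor" 0 with hnf
  set step := d.getD "step_size" 0 with hstep
  by_cases hpos : n ≤ 0
  · rw [if_pos hpos, PySem.List.pyRange_one_eq_nil (by omega)]
    simp
  · rw [if_neg hpos]
    replace hpos : 0 < n := by omega
    have htd : Int.tdiv n 6 = PySem.Int.floordiv n 6 := by
      rw [PySem.Int.floordiv_eq_ediv_of_pos (by omega),
          Int.tdiv_eq_ediv_of_nonneg (by omega)]
    rw [htd]
    set s := PySem.Int.floordiv n 6 with hs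
    have hsed : s = n / 6 := by rw [hs, PySem.Int.floordiv_eq_ediv_of_pos (by omega)]
    have hs0 : 0 ≤ s := by omega
    have h4 : 4 * s ≤ n := by omega
    rw [PySem.List.pyRange_one_append 0 (2 * s) n (by omega) (by omega),
        PySem.List.pyRange_one_append (2 * s) (3 * s) n (by omega) (by omega),
        PySem.List.pyRange_one_append (3 * s) (4 * s) n (by omega) (by omega)]
    simp only [List.foldl_append]
    rw [kochStep_flat d s (PySem.List.pyRange 0 (2 * s) 1) (fun i hi => by
          rw [PySem.List.mem_pyRange_one] at hi; omega)]
    rw [kochStep_rise d s (PySem.List.pyRange (2 * s) (3 * s) 1) (fun i hi => by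
          rw [PySem.List.mem_pyRange_one] at hi; omega)]
    rw [kochStep_fall d s (PySem.List.pyRange (3 * s) (4 * s) 1) (fun i hi => by
          rw [PySem.List.mem_pyRange_one] at hi; omega)]
    rw [kochStep_flat d s (PySem.List.pyRange (4 * s) n 1) (fun i hi => by
          rw [PySem.List.mem_pyRange_one] at hi; omega)]
    dsimp only
    have hlen23 : (PySem.List.pyRange (2 * s) (3 * s) 1).length = s.toNat := by
      rw [PySem.List.length_pyRange_one]; congr 1; ring
    have hlen34 : (PySem.List.pyRange (3 * s) (4 * s) 1).length = s.toNat := by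
      rw [PySem.List.length_pyRange_one]; congr 1; ring
    rw [hlen23, hlen34, Int.toNat_of_nonneg hs0, ← hnf, ← hstep]
    have e1 : ∀ (a b c : Int), List.map (fun _ : Int => c) (PySem.List.pyRange a b 1)
        = List.replicate (b - a).toNat c := by
      intro a b c
      rw [List.map_const', PySem.List.length_pyRange_one]
    rw [e1, e1]
    have hsub : (2 * s - 0 : Int) = 2 * s := by ring
    rw [hsub]
    by_cases hs1 : 0 < s
    · rw [if_pos hs1]
      have e2 : List.map (fun j => nf + 1 + step * j) (PySem.List.pyRange 1 (s + 1) 1)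
          = List.map (fun k : Nat => nf + (1 + (0 + step * ((k : Int) + 1)))) (List.range s.toNat) := by
        rw [PySem.List.pyRange_one, List.map_map]
        have h1 : ((s + 1) - 1).toNat = s.toNat := by omega
        rw [h1]
        apply List.map_congr_left
        intro k _
        simp only [Function.comp_apply]
        ring
      have e3 : List.map (fun j => |nf + 1 + step * (s - j)|) (PySem.List.pyRange 1 (s + 1) 1)
          = List.map (fun k : Nat => |nf + (1 + (0 + step * s - step * ((k : Int) + 1)))|) (List.range s.toNat) := by
        rw [PySem.List.pyRange_one, List.map_map]
        have h1 : ((s + 1) - 1).toNat = s.toNat := by omega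
        rw [h1]
        apply List.map_congr_left
        intro k _
        simp only [Function.comp_apply]
        congr 1
        ring
      rw [e2, e3]
      simp [List.append_assoc]
    · rw [if_neg hs1]
      have hs00 : s = 0 := by omega
      rw [hs00]
      simp
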